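-- pv_equiv track=rewrite | github.com/MaciekIKarolina/Nonogram-Project | Nonogram/Solver.py | row_to_clues
-- ===== SOURCE A (Python) =====
-- def row_to_clues(X):
--     """
--     converts array with -1 (empty cell) and 1 (filled cell) to a list of clues
--
--     >>> row_to_clues([-1,-1,1,1,-1,-1,-1,1,-1,-1,1,1,1,1,1,1,
--                       -1,-1,-1,1,-1,-1,-1])
--     [2, 1, 6, 1]
--     """
--     U = []
--     j = 0
--     running = False
--     for x in X:
--         if x == 1:
--             if not running:
--                 U.append(0)
--             running = True
--             U[j] = U[j] + 1
--         if x == -1: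
--             if running:
--                 j = j + 1
--             running = False
--     if U == []:
--         U = [0]
--     return U
-- ===== SOURCE B (Python) =====
-- def row_to_clues(X):
--     # Two-pass: drop ignored values first (only 1 and -1 matter), then scan
--     # maximal equal runs with two index pointers and emit lengths of 1-runs.
--     filtered = [x for x in X if x == 1 or x == -1]
--     clues = []
--     i = 0
--     n = len(filtered)
--     while i < n:
--         j = i
--         while j < n and filtered[j] == filtered[i]:
--             j += 1
--         if filtered[i] == 1:
--             clues.append(j - i)
--         i = j
--     return clues if clues else [0]
-- ===== Notes on version B (the rewrite author's own statement) =====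
-- stated objective: alternative
-- what changed: Replaces the single-pass running-flag/index-mutation scan with a two-pass approach: prefilter to the significant values {1,-1}, then group maximal equal runs with two pointers and emit the lengths of 1-runs.
import Mathlib
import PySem

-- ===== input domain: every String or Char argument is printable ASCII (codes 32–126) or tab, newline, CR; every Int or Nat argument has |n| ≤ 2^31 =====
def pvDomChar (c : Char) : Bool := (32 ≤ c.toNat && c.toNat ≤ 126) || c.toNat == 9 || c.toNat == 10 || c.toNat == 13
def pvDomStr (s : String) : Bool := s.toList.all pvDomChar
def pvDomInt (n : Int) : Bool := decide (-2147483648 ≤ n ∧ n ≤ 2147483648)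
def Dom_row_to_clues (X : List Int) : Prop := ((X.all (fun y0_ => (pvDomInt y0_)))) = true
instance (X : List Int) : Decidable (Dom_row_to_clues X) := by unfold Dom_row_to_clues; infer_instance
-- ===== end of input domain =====

-- B differs from A structurally (prefilter + run grouping vs running flag); same return value everywhere.

-- ===== PORT A =====
-- one Python loop iteration over state (U, j, running)
def stepA (s : List Int × Nat × Bool) (x : Int) : List Int × Nat × Bool :=
  match s with
  | (U, j, running) =>
    if x = 1 then
      let U' := if running then U else U ++ [0]
      (U'.set j (U'.getD j 0 + 1), j, true)
    else if x = -1 then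
      (U, if running then j + 1 else j, false)
    else (U, j, running)

def row_to_clues (X : List Int) : List Int :=
  let res := X.foldl stepA ([], 0, false)
  if res.1 = [] then [0] else res.1

-- ===== PORT B =====
-- the list comprehension: keep only the significant values 1 and -1
def pvFilterB (X : List Int) : List Int := X.filter (fun x => x == 1 || x == -1)

-- the two-pointer while loops: peel one maximal equal run at a time,
-- emit its length when it is a run of 1s
def pvGroups : List Int → List Int
  | [] => []
  | x :: rest =>
    let run := rest.takeWhile (· == x)
    let rest' := rest.dropWhile (· == x)
    if x = 1 then (1 + (run.length : Int)) :: pvGroups rest' else pvGroups rest'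
termination_by L => L.length
decreasing_by
  all_goals
    simp only [List.length_cons]
    exact Nat.lt_succ_of_le (List.length_dropWhile_le _ rest)

def row_to_clues_alt (X : List Int) : List Int :=
  let clues := pvGroups (pvFilterB X)
  if clues = [] then [0] else clues

-- ===== PRECONDITION & SPEC =====
def Spec_row_to_clues (X : List Int) (out : List Int) : Prop := out = row_to_clues_alt X
instance (X : List Int) (out : List Int) : Decidable (Spec_row_to_clues X out) := by unfold Spec_row_to_clues; infer_instance

-- ===== CLAIM (what is proved, stated in full; the proofs are below) =====
def Claim_equal_row_to_clues : Prop := ∀ (X : List Int), Dom_row_to_clues X → Spec_row_to_clues X (row_to_clues X)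

-- ===== LEMMAS AND PROOFS =====

-- elements other than 1 and -1 leave A's state unchanged
theorem stepA_other (s : List Int × Nat × Bool) (x : Int) (h1 : ¬ x = 1) (h2 : ¬ x = -1) :
    stepA s x = s := by
  obtain ⟨U, j, r⟩ := s
  simp [stepA, h1, h2]

-- A's fold sees only the filtered elements
theorem foldl_stepA_filter (X : List Int) (s : List Int × Nat × Bool) :
    X.foldl stepA s = (pvFilterB X).foldl stepA s := by
  induction X generalizing s with
  | nil => rfl
  | cons x rest ih =>
    by_cases h1 : x = 1
    · simp [pvFilterB, List.filter, h1, List.foldl, ih]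
    · by_cases h2 : x = -1
      · simp [pvFilterB, List.filter, h2, List.foldl, ih]
      · have hb : (x == (1:Int) || x == -1) = false := by simp [h1, h2]
        simp [pvFilterB, List.filter, hb, List.foldl, stepA_other s x h1 h2, ih]

theorem set_append_singleton (U : List Int) (c v : Int) :
    (U ++ [c]).set U.length v = U ++ [v] := by
  induction U with
  | nil => rfl
  | cons a t ih => simp [ih]

-- pvGroups ignores a leading -1
theorem pvGroups_cons_neg (L : List Int) :
    pvGroups ((-1) :: L) = pvGroups L := by
  rw [pvGroups]
  simp only [if_neg (by decide : ¬ ((-1:Int) = 1))]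
  match L with
  | [] => rfl
  | y :: r =>
    by_cases hy : y = (-1 : Int)
    · subst hy
      rw [pvGroups]
      simp [List.dropWhile]
    · have hb : (y == (-1:Int)) = false := by simp [hy]
      simp [List.dropWhile, hb]

-- result of B's grouping when entering with an open run of accumulated count c
def gRun (c : Int) (L : List Int) : List Int :=
  (c + ((L.takeWhile (· == (1:Int))).length : Int)) :: pvGroups (L.dropWhile (· == (1:Int)))

-- the main invariant: A's fold from the two reachable state shapes produces B's grouping
theorem mainInv (L : List Int) (hL : ∀ x ∈ L, x = 1 ∨ x = -1) :
    (∀ U : List Int, (L.foldl stepA (U, U.length, false)).1 = U ++ pvGroups L)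
    ∧ (∀ (U : List Int) (c : Int),
        (L.foldl stepA (U ++ [c], U.length, true)).1 = U ++ gRun c L) := by
  induction L with
  | nil =>
    constructor
    · intro U; simp [pvGroups]
    · intro U c; simp [gRun, pvGroups]
  | cons x rest ih =>
    have hx := hL x (by simp)
    have hrest : ∀ y ∈ rest, y = 1 ∨ y = -1 := fun y hy => hL y (by simp [hy])
    obtain ⟨ih1, ih2⟩ := ih hrest
    constructor
    · intro U
      rcases hx with hx | hx <;> subst hx
      · have hstep : stepA (U, U.length, false) 1 = (U ++ [1], U.length, true) := by
          simp [stepA, set_append_singleton U 0 1]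
        rw [List.foldl_cons, hstep, ih2 U 1]
        rw [pvGroups]
        simp [gRun]
      · have hstep : stepA (U, U.length, false) (-1) = (U, U.length, false) := by
          simp [stepA]
        rw [List.foldl_cons, hstep, ih1 U, pvGroups_cons_neg]
    · intro U c
      rcases hx with hx | hx <;> subst hx
      · have hstep : stepA (U ++ [c], U.length, true) 1 = (U ++ [c + 1], U.length, true) := by
          simp [stepA, set_append_singleton U c (c + 1)]
        rw [List.foldl_cons, hstep, ih2 U (c + 1)]
        simp [gRun, List.takeWhile, List.dropWhile]
        ring
      · have hstep : stepA (U ++ [c], U.length, true) (-1)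
            = (U ++ [c], (U ++ [c]).length, false) := by
          simp [stepA]
        rw [List.foldl_cons, hstep, ih1 (U ++ [c])]
        simp [gRun, List.takeWhile, List.dropWhile, pvGroups_cons_neg]

theorem ports_agree (X : List Int) : row_to_clues X = row_to_clues_alt X := by
  have hmem : ∀ x ∈ pvFilterB X, x = 1 ∨ x = -1 := by
    intro x hx
    simp only [pvFilterB, List.mem_filter] at hx
    rcases hx with ⟨-, h⟩
    rcases Bool.or_eq_true_iff.mp h with h | h
    · left; exact eq_of_beq h
    · right; exact eq_of_beq h
  have hfold := foldl_stepA_filter X ([], 0, false)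
  have hmain := (mainInv (pvFilterB X) hmem).1 []
  simp only [List.length_nil] at hmain
  unfold row_to_clues row_to_clues_alt
  simp only [hfold, hmain, List.nil_append]

-- ===== VERDICT (by name: the statement is the Claim_ definition above) =====
theorem row_to_clues_spec : Claim_equal_row_to_clues := by
  intro X _
  unfold Spec_row_to_clues
  exact ports_agree X
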